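-- pv_equiv track=rewrite | github.com/selfreferencing/erdos-86-lean | path3_proof.py | coprime_pairs
-- ===== SOURCE A (Python) =====
-- import math
-- from typing import List, Tuple, Optional, Dict
--
-- def get_divisors(n: int) -> List[int]:
--     if n <= 0:
--         return []
--     divs = []
--     for i in range(1, int(math.isqrt(n)) + 1):
--         if n % i == 0:
--             divs.append(i)
--             if i != n // i:
--                 divs.append(n // i)
--     return sorted(divs)
--
-- def coprime_pairs(n: int) -> List[Tuple[int, int]]:
--     divs = get_divisors(n)
--     pairs = []
--     for i, a in enumerate(divs):
--         for b in divs[i:]: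
--             if math.gcd(a, b) == 1:
--                 pairs.append((a, b))
--     return pairs
-- ===== SOURCE B (Python) =====
-- import math
--
-- def coprime_pairs(n):
--     if n <= 0:
--         return []
--     # prime factorization of n by trial division
--     factors = []
--     m = n
--     p = 2
--     while p * p <= m:
--         if m % p == 0:
--             e = 0
--             while m % p == 0:
--                 m //= p
--                 e += 1
--             factors.append((p, e))
--         p += 1
--     if m > 1:
--         factors.append((m, 1))
--     # divisors = products of one power of each prime
--     divs = [1]
--     for p, e in factors:
--         pw = [p ** k for k in range(e + 1)]
--         divs = [d * q for d in divs for q in pw]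
--     divs.sort()
--     # pairs over successive suffixes of the sorted divisor list
--     pairs = []
--     while divs:
--         a = divs[0]
--         pairs += [(a, b) for b in divs if math.gcd(a, b) == 1]
--         divs = divs[1:]
--     return pairs
-- ===== Notes on version B (the rewrite author's own statement) =====
-- stated objective: alternative
-- what changed: B replaces A's sqrt-scan divisor collection (append i and n//i for each i up to isqrt(n), then sort) by prime factorization via trial division followed by building the divisor list as the cartesian product of prime-power lists, and replaces A's enumerate-plus-slice nested pair loop by an iterative loop over successive suffixes of the sorted divisor list.
import Mathlib
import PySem

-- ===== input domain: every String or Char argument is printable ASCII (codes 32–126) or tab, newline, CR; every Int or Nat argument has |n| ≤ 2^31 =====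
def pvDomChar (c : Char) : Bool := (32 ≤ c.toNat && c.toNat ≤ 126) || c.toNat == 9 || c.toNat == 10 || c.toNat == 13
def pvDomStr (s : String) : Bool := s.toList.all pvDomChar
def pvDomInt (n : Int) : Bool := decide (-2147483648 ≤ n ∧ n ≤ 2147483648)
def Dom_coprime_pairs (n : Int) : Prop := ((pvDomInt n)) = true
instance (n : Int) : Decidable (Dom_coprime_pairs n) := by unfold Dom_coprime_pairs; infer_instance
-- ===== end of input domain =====

-- B finds the divisors of n by prime-factorizing n (trial division) and expanding the
-- cartesian product of prime-power lists, instead of A's isqrt-scan with cofactors, and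
-- walks successive suffixes of the sorted list for the pairs; objective: alternative, same cost.

-- ===== PORT A =====
def get_divisors (n : Int) : List Int :=
  if n ≤ 0 then []
  else
    let divs := (PySem.List.pyRange 1 (Int.sqrt n + 1) 1).foldl
      (fun divs i =>
        if PySem.Int.mod n i == 0 then
          let divs := divs ++ [i]
          if i != PySem.Int.floordiv n i then divs ++ [PySem.Int.floordiv n i] else divs
        else divs) []
    PySem.List.sorted divs (fun x => x) false

def coprime_pairs (n : Int) : List (Int × Int) :=
  let divs := get_divisors n
  (PySem.List.enumerate divs 0).foldl
    (fun pairs p =>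
      (PySem.List.slice divs (some p.1) none).foldl
        (fun pairs b => if Int.gcd p.2 b == 1 then pairs ++ [(p.2, b)] else pairs)
        pairs)
    []

-- ===== PORT B =====
-- inner `while m % p == 0` loop of Source B: divides p out of m, counting; the fuel and the
-- `2 ≤ p ∧ 1 ≤ m` guard conjuncts only make the recursion structural/total (they always hold)
def pvPullOut : Nat → Int → Int → Int × Int
  | 0, m, _ => (m, 0)
  | fuel + 1, m, p =>
    if PySem.Int.mod m p = 0 ∧ 2 ≤ p ∧ 1 ≤ m then
      ((pvPullOut fuel (PySem.Int.floordiv m p) p).1,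
       (pvPullOut fuel (PySem.Int.floordiv m p) p).2 + 1)
    else (m, 0)

-- outer `while p * p <= m` loop of Source B (fuel only makes the recursion structural; n.toNat is enough)
def pvFactorLoop : Nat → Int → Int → List (Int × Int) → List (Int × Int) × Int
  | 0, m, _, acc => (acc, m)
  | fuel + 1, m, p, acc =>
    if p * p ≤ m then
      if PySem.Int.mod m p = 0 then
        pvFactorLoop fuel (pvPullOut m.toNat m p).1 (p + 1)
          (acc ++ [(p, (pvPullOut m.toNat m p).2)])
      else pvFactorLoop fuel m (p + 1) acc
    else (acc, m)

-- `while divs:` pair loop of Source B over successive suffixes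
def pvPairLoop (divs : List Int) (pairs : List (Int × Int)) : List (Int × Int) :=
  match divs with
  | [] => pairs
  | a :: rest =>
      pvPairLoop rest
        (pairs ++ ((a :: rest).filter (fun b => Int.gcd a b == 1)).map (fun b => (a, b)))

def coprime_pairs_alt (n : Int) : List (Int × Int) :=
  if n ≤ 0 then []
  else
    let fr := pvFactorLoop n.toNat n 2 []
    let factors := if 1 < fr.2 then fr.1 ++ [(fr.2, 1)] else fr.1
    let divs := factors.foldl
      (fun divs pe =>
        let pw := (PySem.List.pyRange 0 (pe.2 + 1) 1).map (fun k => pe.1 ^ k.toNat)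
        divs.flatMap (fun d => pw.map (fun q => d * q))) [1]
    pvPairLoop (PySem.List.sorted divs (fun x => x) false) []

-- ===== PRECONDITION & SPEC =====
def Spec_coprime_pairs (n : Int) (out : List (Int × Int)) : Prop := out = coprime_pairs_alt n
instance (n : Int) (out : List (Int × Int)) : Decidable (Spec_coprime_pairs n out) := by unfold Spec_coprime_pairs; infer_instance

-- ===== CLAIM (what is proved, stated in full; the proofs are below) =====
def Claim_equal_coprime_pairs : Prop := ∀ (n : Int), Dom_coprime_pairs n → Spec_coprime_pairs n (coprime_pairs n)

-- ===== LEMMAS AND PROOFS =====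

-- proof-side names for A's divisor-collection pieces
def pvP (n i : Int) : Bool := PySem.Int.mod n i == 0
def pvF (n i : Int) : Int := PySem.Int.floordiv n i
def pvSmall (n : Int) : List Int :=
  (PySem.List.pyRange 1 (Int.sqrt n + 1) 1).filter (pvP n)
def pvLarge (n : Int) : List Int :=
  ((pvSmall n).reverse.filter (fun i => i * i != n)).map (pvF n)
def pvG (n i : Int) : List Int :=
  if pvP n i then (if i != pvF n i then [i, pvF n i] else [i]) else []
def pvRawA (n : Int) : List Int :=
  (PySem.List.pyRange 1 (Int.sqrt n + 1) 1).flatMap (pvG n)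
-- proof-side names for B's divisor-construction pieces
def pvStep (divs : List Int) (pe : Int × Int) : List Int :=
  let pw := (PySem.List.pyRange 0 (pe.2 + 1) 1).map (fun k => pe.1 ^ k.toNat)
  divs.flatMap (fun d => pw.map (fun q => d * q))
def pvProdPW (F : List (Int × Int)) : Int := (F.map (fun pe => pe.1 ^ pe.2.toNat)).prod
def pvGoodF (F : List (Int × Int)) : Prop :=
  (∀ pe ∈ F, 2 ≤ pe.1 ∧ 1 ≤ pe.2 ∧ Prime pe.1) ∧ F.Pairwise (fun a b => a.1 < b.1)
def pvFactors (n : Int) : List (Int × Int) :=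
  if 1 < (pvFactorLoop n.toNat n 2 []).2
  then (pvFactorLoop n.toNat n 2 []).1 ++ [((pvFactorLoop n.toNat n 2 []).2, 1)]
  else (pvFactorLoop n.toNat n 2 []).1
def pvRawB (n : Int) : List Int := (pvFactors n).foldl pvStep [1]

theorem sqrt_mul_self_le (n : Int) (h : 0 ≤ n) : Int.sqrt n * Int.sqrt n ≤ n := by
  unfold Int.sqrt
  have h1 := Nat.sqrt_le' n.toNat
  have h2 : ((Nat.sqrt n.toNat : Int)) ^ 2 ≤ (n.toNat : Int) := by exact_mod_cast h1
  rw [pow_two] at h2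
  omega

theorem lt_succ_sqrt_mul (n : Int) (h : 0 ≤ n) :
    n < (Int.sqrt n + 1) * (Int.sqrt n + 1) := by
  unfold Int.sqrt
  have h1 : n.toNat < (n.toNat.sqrt + 1) * (n.toNat.sqrt + 1) := by
    have := Nat.lt_succ_sqrt' n.toNat
    simpa [Nat.succ_eq_add_one, pow_two] using this
  have h2 : ((n.toNat : Int)) < ((n.toNat.sqrt : Int) + 1) * ((n.toNat.sqrt : Int) + 1) := by
    exact_mod_cast h1
  omega

theorem divisor_mul (n i : Int) (hn : 0 < n) (h1 : 1 ≤ i) (hd : i ∣ n) :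
    pvF n i * i = n ∧ 1 ≤ pvF n i := by
  have hi : (0:Int) < i := by omega
  have he : pvF n i = n / i := PySem.Int.floordiv_eq_ediv_of_pos hi
  have hm : n / i * i = n := Int.ediv_mul_cancel hd
  constructor
  · rw [he]; exact hm
  · rw [he]; nlinarith

theorem fold_g (n : Int) (xs : List Int) (acc : List Int) :
    xs.foldl
      (fun divs i =>
        if PySem.Int.mod n i == 0 then
          let divs := divs ++ [i]
          if i != PySem.Int.floordiv n i then divs ++ [PySem.Int.floordiv n i] else divs
        else divs) acc = acc ++ xs.flatMap (pvG n) := by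
  have hf : (fun (divs : List Int) (i : Int) =>
      if PySem.Int.mod n i == 0 then
        let divs := divs ++ [i]
        if i != PySem.Int.floordiv n i then divs ++ [PySem.Int.floordiv n i] else divs
      else divs) = fun divs i => divs ++ pvG n i := by
    funext divs i
    simp only [pvG, pvP, pvF]
    split_ifs <;> simp
  rw [hf, PySem.List.foldl_append_eq_flatMap]

theorem flatMap_split {α β : Type} (g1 g2 : α → List β) (xs : List α) :
    (xs.flatMap (fun i => g1 i ++ g2 i)).Perm (xs.flatMap g1 ++ xs.flatMap g2) := by
  induction xs with
  | nil => simp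
  | cons x t ih =>
    simp only [List.flatMap_cons]
    refine List.Perm.trans (List.Perm.append_left _ ih) ?_
    simp only [List.append_assoc]
    exact List.Perm.append_left _ (List.perm_append_comm_assoc (g2 x) (t.flatMap g1) (t.flatMap g2))

theorem flatMap_single {α : Type} (p : α → Bool) (xs : List α) :
    xs.flatMap (fun i => if p i then [i] else []) = xs.filter p := by
  induction xs with
  | nil => rfl
  | cons x t ih => simp only [List.flatMap_cons, List.filter_cons]; split_ifs <;> simp [ih]

theorem flatMap_map_single {α β : Type} (q : α → Bool) (f : α → β) (xs : List α) :
    xs.flatMap (fun i => if q i then [f i] else []) = (xs.filter q).map f := by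
  induction xs with
  | nil => rfl
  | cons x t ih => simp only [List.flatMap_cons, List.filter_cons]; split_ifs <;> simp [ih]

theorem mem_small (n i : Int) (h : i ∈ pvSmall n) :
    1 ≤ i ∧ i ≤ Int.sqrt n ∧ i ∣ n := by
  simp only [pvSmall, List.mem_filter, PySem.List.mem_pyRange_one, pvP, beq_iff_eq] at h
  obtain ⟨⟨h1, h2⟩, h3⟩ := h
  exact ⟨h1, by omega, (PySem.Int.mod_eq_zero_iff_dvd n i).mp h3⟩

theorem cond_congr (n : Int) (hn : 0 < n) (i : Int) (hi : i ∈ PySem.List.pyRange 1 (Int.sqrt n + 1) 1) :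
    ((i != pvF n i) && pvP n i) = ((i * i != n) && pvP n i) := by
  have h1 : 1 ≤ i := (PySem.List.mem_pyRange_one.mp hi).1
  cases hp : pvP n i with
  | false => simp
  | true =>
    have hd : i ∣ n := by
      have hp' := hp
      simp only [pvP, beq_iff_eq] at hp'
      exact (PySem.Int.mod_eq_zero_iff_dvd n i).mp hp'
    obtain ⟨hm, hge⟩ := divisor_mul n i hn h1 hd
    have hiff : i = pvF n i ↔ i * i = n := by
      constructor
      · intro h; nlinarith
      · intro h
        have h0 : i ≠ 0 := by omega
        have : i * i = pvF n i * i := by omega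
        exact mul_right_cancel₀ h0 this
    have hb : (i != pvF n i) = (i * i != n) := by
      simp only [bne]
      rw [show (i == pvF n i) = (i * i == n) from by
        rw [Bool.eq_iff_iff]; simpa [beq_iff_eq] using hiff]
    rw [hb]

theorem raw_perm (n : Int) (hn : 0 < n) :
    (pvSmall n ++ pvLarge n).Perm (pvRawA n) := by
  have hg : pvG n = fun i =>
      (if pvP n i then [i] else []) ++ (if (i != pvF n i) && pvP n i then [pvF n i] else []) := by
    funext i
    by_cases hp : pvP n i = true <;> by_cases hne : (i != pvF n i) = true <;>
      simp [pvG, hp, hne]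
  unfold pvRawA
  rw [hg]
  have h2 := flatMap_split (fun i => if pvP n i then [i] else [])
    (fun i => if (i != pvF n i) && pvP n i then [pvF n i] else [])
    (PySem.List.pyRange 1 (Int.sqrt n + 1) 1)
  rw [flatMap_single, flatMap_map_single] at h2
  refine List.Perm.symm (List.Perm.trans h2 ?_)
  refine List.Perm.append_left _ ?_
  rw [List.filter_congr (fun i hi => cond_congr n hn i hi)]
  have h4 : pvLarge n =
      (((PySem.List.pyRange 1 (Int.sqrt n + 1) 1).filter
        (fun i => (i * i != n) && pvP n i)).map (pvF n)).reverse := by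
    simp only [pvLarge, pvSmall, List.filter_reverse, List.filter_filter, List.map_reverse]
  rw [h4]
  exact (List.reverse_perm _).symm

theorem pairwise_SL (n : Int) (hn : 0 < n) :
    (pvSmall n ++ pvLarge n).Pairwise (· < ·) := by
  have hrr : Int.sqrt n * Int.sqrt n ≤ n := sqrt_mul_self_le n (by omega)
  have hmemL : ∀ b ∈ pvLarge n, ∃ i, 1 ≤ i ∧ i ≤ Int.sqrt n ∧ i ∣ n ∧ i * i ≠ n ∧ b = pvF n i := by
    intro b hb
    simp only [pvLarge, List.mem_map, List.mem_filter, List.mem_reverse] at hb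
    obtain ⟨i, ⟨hiS, hine⟩, rfl⟩ := hb
    obtain ⟨h1, h2, h3⟩ := mem_small n i hiS
    refine ⟨i, h1, h2, h3, ?_, rfl⟩
    simpa [bne] using hine
  have hs : (pvSmall n).Pairwise (· < ·) :=
    List.Pairwise.filter _ (PySem.List.pairwise_lt_pyRange_one 1 (Int.sqrt n + 1))
  rw [List.pairwise_append]
  refine ⟨hs, ?_, ?_⟩
  · simp only [pvLarge]
    rw [List.pairwise_map]
    refine List.Pairwise.imp_of_mem ?_
      (List.Pairwise.filter _ (List.pairwise_reverse.mpr hs))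
    intro a b ha hb hlt
    have haS : a ∈ pvSmall n := List.mem_reverse.mp (List.mem_of_mem_filter ha)
    have hbS : b ∈ pvSmall n := List.mem_reverse.mp (List.mem_of_mem_filter hb)
    obtain ⟨h1a, h2a, h3a⟩ := mem_small n a haS
    obtain ⟨h1b, h2b, h3b⟩ := mem_small n b hbS
    obtain ⟨hma, hga⟩ := divisor_mul n a hn h1a h3a
    obtain ⟨hmb, hgb⟩ := divisor_mul n b hn h1b h3b
    nlinarith
  · intro a ha b hb
    obtain ⟨h1a, h2a, _⟩ := mem_small n a ha
    obtain ⟨i, h1i, h2i, h3i, h4i, rfl⟩ := hmemL _ hb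
    obtain ⟨hmi, hgi⟩ := divisor_mul n i hn h1i h3i
    have hss : i * i ≤ Int.sqrt n * Int.sqrt n :=
      mul_le_mul h2i h2i (by omega) (Int.sqrt_nonneg n)
    have hii : i * i < n := lt_of_le_of_ne (le_trans hss hrr) h4i
    by_contra hcon
    have hcon' : pvF n i ≤ a := by omega
    have hfs : pvF n i ≤ Int.sqrt n := le_trans hcon' h2a
    have hm1 : pvF n i * pvF n i ≤ n :=
      le_trans (mul_le_mul hfs hfs (by omega) (Int.sqrt_nonneg n)) hrr
    have hm2 : pvF n i ≤ i := by nlinarith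
    nlinarith

theorem mem_SL (n : Int) (hn : 0 < n) (x : Int) :
    x ∈ pvSmall n ++ pvLarge n ↔ 1 ≤ x ∧ x ∣ n := by
  rw [List.mem_append]
  constructor
  · rintro (h | h)
    · obtain ⟨h1, _, h3⟩ := mem_small n x h
      exact ⟨h1, h3⟩
    · simp only [pvLarge, List.mem_map, List.mem_filter, List.mem_reverse] at h
      obtain ⟨i, ⟨hiS, _⟩, rfl⟩ := h
      obtain ⟨h1, _, h3⟩ := mem_small n i hiS
      obtain ⟨hm, hge⟩ := divisor_mul n i hn h1 h3
      exact ⟨hge, ⟨i, hm.symm⟩⟩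
  · rintro ⟨h1, h2⟩
    by_cases hle : x ≤ Int.sqrt n
    · left
      simp only [pvSmall, List.mem_filter, PySem.List.mem_pyRange_one, pvP, beq_iff_eq]
      exact ⟨⟨h1, by omega⟩, (PySem.Int.mod_eq_zero_iff_dvd n x).mpr h2⟩
    · right
      push_neg at hle
      obtain ⟨c, hc⟩ := h2
      have hc1 : 1 ≤ c := by nlinarith
      have hsq := lt_succ_sqrt_mul n (by omega)
      have hcs : c ≤ Int.sqrt n := by
        by_contra hcon
        push_neg at hcon
        have hx1 : Int.sqrt n + 1 ≤ x := by omega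
        have hc2 : Int.sqrt n + 1 ≤ c := by omega
        have hs0 : 0 ≤ Int.sqrt n := Int.sqrt_nonneg n
        nlinarith
      have hcd : c ∣ n := ⟨x, by rw [hc]; ring⟩
      have hcS : c ∈ pvSmall n := by
        simp only [pvSmall, List.mem_filter, PySem.List.mem_pyRange_one, pvP, beq_iff_eq]
        exact ⟨⟨hc1, by omega⟩, (PySem.Int.mod_eq_zero_iff_dvd n c).mpr hcd⟩
      have hFc : pvF n c = x := by
        have he : pvF n c = n / c := PySem.Int.floordiv_eq_ediv_of_pos (by omega)
        rw [he, hc, show x * c = c * x by ring]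
        exact Int.mul_ediv_cancel_left x (by omega)
      have hcc : c * c ≠ n := by nlinarith
      simp only [pvLarge, List.mem_map, List.mem_filter, List.mem_reverse]
      exact ⟨c, ⟨hcS, by simpa [bne] using hcc⟩, hFc⟩

theorem get_divisors_eq (n : Int) (hn : 0 < n) :
    get_divisors n = PySem.List.sorted (pvRawA n) (fun x => x) false := by
  unfold get_divisors
  rw [if_neg (by omega)]
  rw [fold_g n _ [], List.nil_append]
  rfl

-- ---- B-side: correctness of the trial-division factorization ----

theorem prime_of_no_small (m : Int) (h2 : 2 ≤ m)
    (h : ∀ q, 2 ≤ q → q * q ≤ m → ¬ q ∣ m) : Prime m := by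
  have hM : m.natAbs.Prime := by
    rw [Nat.prime_def_lt]
    refine ⟨by omega, ?_⟩
    intro k hk hkd
    by_contra hk1
    have hk2 : 2 ≤ k := by
      rcases Nat.lt_or_ge k 2 with h' | h'
      · interval_cases k
        · have : m.natAbs = 0 := Nat.eq_zero_of_zero_dvd hkd
          omega
        · exact absurd rfl hk1
      · exact h'
    have hkdZ : (k : Int) ∣ m := by
      have h3 := Int.natCast_dvd_natCast.mpr hkd
      rwa [Int.natAbs_of_nonneg (by omega)] at h3
    rcases lt_or_ge m ((k : Int) * k) with hlt | hle
    swap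
    · exact h k (by exact_mod_cast hk2) hle hkdZ
    · obtain ⟨c, hc⟩ := hkdZ
      have hkpos : (0:Int) < k := by exact_mod_cast Nat.lt_of_lt_of_le Nat.zero_lt_two hk2
      have hc1 : 1 ≤ c := by nlinarith
      have hck : c ∣ m := ⟨k, by rw [hc]; ring⟩
      rcases eq_or_lt_of_le hc1 with hceq | hcgt
      · have hmk : m = k := by rw [hc, ← hceq, mul_one]
        omega
      · have hclt : c < (k:Int) := by nlinarith
        have hcc : c * c ≤ m := by nlinarith
        exact h c (by omega) hcc hck
  have hcast : m = ↑m.natAbs := by rw [Int.natAbs_of_nonneg (by omega)]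
  rw [hcast]
  exact Nat.prime_iff_prime_int.mp hM

theorem pvPullOut_le (fuel : Nat) (m p : Int) (hm : 1 ≤ m) :
    1 ≤ (pvPullOut fuel m p).1 ∧ (pvPullOut fuel m p).1 ≤ m := by
  induction fuel generalizing m with
  | zero => exact ⟨hm, le_refl m⟩
  | succ fuel ih =>
    simp only [pvPullOut]
    split_ifs with h
    · obtain ⟨hmod, hp, hm'⟩ := h
      have hd : p ∣ m := (PySem.Int.mod_eq_zero_iff_dvd m p).mp hmod
      have he : PySem.Int.floordiv m p = m / p := PySem.Int.floordiv_eq_ediv_of_pos (by omega)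
      have hc : m / p * p = m := Int.ediv_mul_cancel hd
      have h1 : 1 ≤ m / p := by nlinarith
      have h2 : PySem.Int.floordiv m p ≤ m := by
        rw [he]; exact Int.ediv_le_self p (by omega : (0:Int) ≤ m)
      obtain ⟨t1, t2⟩ := ih (PySem.Int.floordiv m p) (by rw [he]; exact h1)
      exact ⟨t1, le_trans t2 h2⟩
    · exact ⟨hm, le_refl m⟩

theorem pvPullOut_spec (fuel : Nat) (m p : Int) (hm : 1 ≤ m) (hp : 2 ≤ p)
    (hf : m.toNat ≤ fuel) :
    0 ≤ (pvPullOut fuel m p).2 ∧ 1 ≤ (pvPullOut fuel m p).1 ∧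
    (pvPullOut fuel m p).1 * p ^ (pvPullOut fuel m p).2.toNat = m ∧
    ¬ p ∣ (pvPullOut fuel m p).1 ∧ (p ∣ m → 1 ≤ (pvPullOut fuel m p).2) := by
  induction fuel generalizing m with
  | zero => exact absurd hf (by omega)
  | succ fuel ih =>
    simp only [pvPullOut]
    split_ifs with h
    · obtain ⟨hmod, hp', hm'⟩ := h
      have hd : p ∣ m := (PySem.Int.mod_eq_zero_iff_dvd m p).mp hmod
      have he : PySem.Int.floordiv m p = m / p := PySem.Int.floordiv_eq_ediv_of_pos (by omega)
      have hc : m / p * p = m := Int.ediv_mul_cancel hd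
      have h1 : 1 ≤ m / p := by nlinarith
      have hfl : (PySem.Int.floordiv m p).toNat ≤ fuel := by
        have hlt : m / p < m := by nlinarith
        rw [he]; omega
      obtain ⟨i0, i1, i2, i3, i4⟩ := ih (PySem.Int.floordiv m p) (by rw [he]; exact h1) hfl
      have htn : ((pvPullOut fuel (PySem.Int.floordiv m p) p).2 + 1).toNat
          = (pvPullOut fuel (PySem.Int.floordiv m p) p).2.toNat + 1 := by omega
      refine ⟨by omega, i1, ?_, i3, fun _ => by omega⟩
      show (pvPullOut fuel (PySem.Int.floordiv m p) p).1
          * p ^ ((pvPullOut fuel (PySem.Int.floordiv m p) p).2 + 1).toNat = m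
      rw [htn, pow_succ, ← mul_assoc, i2, he, hc]
    · have hnd : ¬ p ∣ m := by
        intro hdd
        exact h ⟨(PySem.Int.mod_eq_zero_iff_dvd m p).mpr hdd, hp, hm⟩
      exact ⟨le_refl 0, hm, by simp, hnd, fun hdd => absurd hdd hnd⟩

theorem pvFactorLoop_spec (fuel : Nat) (m p : Int) (acc : List (Int × Int))
    (hm : 1 ≤ m) (hp : 2 ≤ p) (hnos : ∀ q, 2 ≤ q → q < p → ¬ q ∣ m)
    (hf : (m - p).toNat < fuel) :
    ∃ F, (pvFactorLoop fuel m p acc).1 = acc ++ F ∧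
      pvProdPW F * (pvFactorLoop fuel m p acc).2 = m ∧
      1 ≤ (pvFactorLoop fuel m p acc).2 ∧
      (∀ pe ∈ F, p ≤ pe.1 ∧ 1 ≤ pe.2 ∧ Prime pe.1) ∧
      F.Pairwise (fun a b => a.1 < b.1) ∧
      ((pvFactorLoop fuel m p acc).2 = 1 ∨
        (Prime (pvFactorLoop fuel m p acc).2 ∧ p ≤ (pvFactorLoop fuel m p acc).2 ∧
          ∀ pe ∈ F, pe.1 < (pvFactorLoop fuel m p acc).2)) := by
  induction fuel generalizing m p acc with
  | zero => exact absurd hf (by omega)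
  | succ fuel ih =>
    simp only [pvFactorLoop]
    split_ifs with hpm hmod
    · -- p ∣ m : pull p out, recurse
      have hd : p ∣ m := (PySem.Int.mod_eq_zero_iff_dvd m p).mp hmod
      obtain ⟨u0, u1, u2, u3, u4⟩ := pvPullOut_spec m.toNat m p hm hp (le_refl _)
      have hpprime : Prime p := by
        apply prime_of_no_small p hp
        intro q hq hqq hqp
        exact hnos q hq (by nlinarith) (dvd_trans hqp hd)
      have he1 : 1 ≤ (pvPullOut m.toNat m p).2 := u4 hd
      have hdvdm : (pvPullOut m.toNat m p).1 ∣ m := ⟨p ^ (pvPullOut m.toNat m p).2.toNat, u2.symm⟩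
      have hnos' : ∀ q, 2 ≤ q → q < p + 1 → ¬ q ∣ (pvPullOut m.toNat m p).1 := by
        intro q hq hqp hqd
        rcases lt_or_ge q p with h' | h'
        · exact hnos q hq h' (dvd_trans hqd hdvdm)
        · have hqe : q = p := by omega
          subst hqe; exact u3 hqd
      have hble := pvPullOut_le m.toNat m p hm
      have hplt : p < m := by nlinarith
      obtain ⟨F', e1, e2, e3, e4, e5, e6⟩ :=
        ih (pvPullOut m.toNat m p).1 (p + 1) (acc ++ [(p, (pvPullOut m.toNat m p).2)]) u1
          (by omega) hnos' (by omega)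
      refine ⟨(p, (pvPullOut m.toNat m p).2) :: F', ?_, ?_, e3, ?_, ?_, ?_⟩
      · rw [e1]; simp
      · have hcons : pvProdPW ((p, (pvPullOut m.toNat m p).2) :: F')
            = p ^ (pvPullOut m.toNat m p).2.toNat * pvProdPW F' := by
          simp [pvProdPW]
        rw [hcons, mul_assoc, e2, mul_comm, u2]
      · intro pe hpe
        rcases List.mem_cons.mp hpe with rfl | hpe'
        · exact ⟨le_refl p, he1, hpprime⟩
        · obtain ⟨ha, hb, hc⟩ := e4 pe hpe'
          exact ⟨by omega, hb, hc⟩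
      · refine List.Pairwise.cons ?_ e5
        intro pe hpe
        have := (e4 pe hpe).1
        simp only []
        omega
      · rcases e6 with h1 | ⟨hpr, hle, hall⟩
        · exact Or.inl h1
        · refine Or.inr ⟨hpr, by omega, ?_⟩
          intro pe hpe
          rcases List.mem_cons.mp hpe with rfl | hpe'
          · simp only []; omega
          · exact hall pe hpe'
    · -- p does not divide m : just advance p
      have hnd : ¬ p ∣ m := fun hdd => hmod ((PySem.Int.mod_eq_zero_iff_dvd m p).mpr hdd)
      have hnos' : ∀ q, 2 ≤ q → q < p + 1 → ¬ q ∣ m := by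
        intro q hq hqp
        rcases lt_or_ge q p with h' | h'
        · exact hnos q hq h'
        · have hqe : q = p := by omega
          subst hqe; exact hnd
      have hplt : p < m := by nlinarith
      obtain ⟨F, e1, e2, e3, e4, e5, e6⟩ := ih m (p + 1) acc hm (by omega) hnos' (by omega)
      refine ⟨F, e1, e2, e3, fun pe h => ⟨by have := (e4 pe h).1; omega, (e4 pe h).2⟩, e5, ?_⟩
      rcases e6 with h1 | ⟨ha, hb, hc⟩
      · exact Or.inl h1
      · exact Or.inr ⟨ha, by omega, hc⟩
    · -- loop exit : the remainder is 1 or prime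
      have hlt : m < p * p := by omega
      refine ⟨[], by simp, by simp [pvProdPW], hm, by simp, List.Pairwise.nil, ?_⟩
      rcases eq_or_lt_of_le hm with h1 | h1
      · exact Or.inl h1.symm
      · refine Or.inr ⟨?_, ?_, by simp⟩
        · apply prime_of_no_small m (by omega)
          intro q hq hqq
          apply hnos q hq
          nlinarith
        · by_contra hcon
          push_neg at hcon
          exact hnos m (by omega) (by omega) dvd_rfl

theorem pvFactors_spec (n : Int) (hn : 1 ≤ n) :
    pvGoodF (pvFactors n) ∧ pvProdPW (pvFactors n) = n := by
  obtain ⟨F, e1, e2, e3, e4, e5, e6⟩ :=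
    pvFactorLoop_spec n.toNat n 2 [] hn (le_refl 2) (by intro q hq hq2; omega) (by omega)
  unfold pvFactors
  rw [e1, List.nil_append]
  rcases e6 with h1 | ⟨hpr, hple, hall⟩
  · rw [if_neg (by omega)]
    refine ⟨⟨fun pe h => ⟨(e4 pe h).1, (e4 pe h).2⟩, e5⟩, ?_⟩
    rw [h1, mul_one] at e2
    exact e2
  · rw [if_pos (by omega)]
    constructor
    · constructor
      · intro pe hpe
        rcases List.mem_append.mp hpe with h | h
        · exact ⟨(e4 pe h).1, (e4 pe h).2⟩
        · rcases List.mem_singleton.mp h with rfl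
          exact ⟨hple, le_refl 1, hpr⟩
      · rw [List.pairwise_append]
        refine ⟨e5, List.pairwise_singleton _ _, ?_⟩
        intro a ha b hb
        rcases List.mem_singleton.mp hb with rfl
        exact hall a ha
    · have happ : pvProdPW (F ++ [((pvFactorLoop n.toNat n 2 []).2, 1)])
          = pvProdPW F * (pvFactorLoop n.toNat n 2 []).2 := by
        simp [pvProdPW]
      rw [happ, e2]

-- ---- B-side: the prime-power product fold enumerates exactly the divisors ----

theorem prodPW_pos (F : List (Int × Int)) (h : ∀ pe ∈ F, 2 ≤ pe.1) : 1 ≤ pvProdPW F := by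
  induction F with
  | nil => simp [pvProdPW]
  | cons pe F ih =>
    have h1 : (1:Int) ≤ pe.1 ^ pe.2.toNat := one_le_pow₀ (by have := h pe (by simp); omega)
    have h2 := ih (fun q hq => h q (by simp [hq]))
    have hc : pvProdPW (pe :: F) = pe.1 ^ pe.2.toNat * pvProdPW F := by simp [pvProdPW]
    rw [hc]; nlinarith

theorem prime_not_dvd_prodPW (p : Int) (hp : Prime p) (hp2 : 2 ≤ p) (F : List (Int × Int))
    (hF : ∀ pe ∈ F, 2 ≤ pe.1 ∧ Prime pe.1 ∧ pe.1 < p) : ¬ p ∣ pvProdPW F := by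
  induction F with
  | nil =>
    intro hdvd
    simp only [pvProdPW, List.map_nil, List.prod_nil] at hdvd
    exact hp.not_dvd_one hdvd
  | cons pe F ih =>
    intro hdvd
    have hc : pvProdPW (pe :: F) = pe.1 ^ pe.2.toNat * pvProdPW F := by simp [pvProdPW]
    rw [hc] at hdvd
    rcases hp.dvd_mul.mp hdvd with h | h
    · have hppe : p ∣ pe.1 := hp.dvd_of_dvd_pow h
      obtain ⟨h2, hprime, hlt⟩ := hF pe (List.mem_cons_self ..)
      have h1 : p.natAbs ∣ pe.1.natAbs := Int.natAbs_dvd_natAbs.mpr hppe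
      have h2' : pe.1.natAbs.Prime := Int.prime_iff_natAbs_prime.mp hprime
      rcases Nat.Prime.eq_one_or_self_of_dvd h2' _ h1 with h3 | h3
      · omega
      · omega
    · exact ih (fun q hq => hF q (List.mem_cons_of_mem _ hq)) h

theorem mem_pw (p e q : Int) (he : 0 ≤ e) :
    q ∈ (PySem.List.pyRange 0 (e + 1) 1).map (fun k => p ^ k.toNat)
      ↔ ∃ k : ℕ, k ≤ e.toNat ∧ q = p ^ k := by
  simp only [List.mem_map, PySem.List.mem_pyRange_one]
  constructor
  · rintro ⟨k, ⟨hk0, hk1⟩, rfl⟩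
    exact ⟨k.toNat, by omega, rfl⟩
  · rintro ⟨k, hk, rfl⟩
    exact ⟨(k : Int), ⟨by omega, by omega⟩, by simp⟩

theorem pow_eq_pow_nat (p : Int) (hp : 2 ≤ p) (k1 k2 : ℕ) (h : p ^ k1 = p ^ k2) : k1 = k2 := by
  have h1 : p.natAbs ^ k1 = p.natAbs ^ k2 := by
    rw [← Int.natAbs_pow, ← Int.natAbs_pow, h]
  exact Nat.pow_right_injective (by omega) h1

theorem pow_mul_cancel_aux (p P d1 d2 : Int) (k1 k2 : ℕ) (hp2 : 2 ≤ p)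
    (hnd : ¬ p ∣ P) (hd1 : d1 ∣ P)
    (heq : d1 * p ^ k1 = d2 * p ^ k2) (hk : k1 ≤ k2) : d1 = d2 ∧ k1 = k2 := by
  have hs : p ^ k2 = p ^ (k2 - k1) * p ^ k1 := by
    rw [← pow_add]
    congr 1
    omega
  rw [hs, ← mul_assoc] at heq
  have hpk : (p : Int) ^ k1 ≠ 0 := pow_ne_zero _ (by omega)
  have hd : d1 = d2 * p ^ (k2 - k1) := mul_right_cancel₀ hpk heq
  rcases Nat.eq_zero_or_pos (k2 - k1) with hz | hpos
  · rw [hz, pow_zero, mul_one] at hd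
    exact ⟨hd, by omega⟩
  · exfalso
    have hpd : p ∣ d1 := by
      rw [hd]
      exact Dvd.dvd.mul_left (dvd_pow_self p (by omega)) d2
    exact hnd (dvd_trans hpd hd1)

theorem pow_mul_cancel (p P d1 d2 : Int) (k1 k2 : ℕ) (hp2 : 2 ≤ p)
    (hnd : ¬ p ∣ P) (hd1 : d1 ∣ P) (hd2 : d2 ∣ P)
    (heq : d1 * p ^ k1 = d2 * p ^ k2) : d1 = d2 ∧ k1 = k2 := by
  rcases le_total k1 k2 with h | h
  · exact pow_mul_cancel_aux p P d1 d2 k1 k2 hp2 hnd hd1 heq h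
  · obtain ⟨ha, hb⟩ := pow_mul_cancel_aux p P d2 d1 k2 k1 hp2 hnd hd2 heq.symm h
    exact ⟨ha.symm, hb.symm⟩

theorem fold_divs (F : List (Int × Int)) :
    pvGoodF F →
    (∀ x, x ∈ F.foldl pvStep [1] ↔ 1 ≤ x ∧ x ∣ pvProdPW F) ∧ (F.foldl pvStep [1]).Nodup := by
  induction F using List.reverseRecOn with
  | nil =>
    intro _
    refine ⟨?_, by simp⟩
    intro x
    simp only [List.foldl_nil, List.mem_singleton, pvProdPW, List.map_nil, List.prod_nil]
    constructor
    · rintro rfl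
      exact ⟨le_refl 1, dvd_rfl⟩
    · rintro ⟨h1, h2⟩
      have := Int.isUnit_iff.mp (isUnit_of_dvd_one h2)
      omega
  | append_singleton F pe ih =>
    intro hF
    have hgood' : pvGoodF F :=
      ⟨fun q hq => hF.1 q (List.mem_append_left _ hq), (List.pairwise_append.mp hF.2).1⟩
    obtain ⟨h2pe, h1e, hppe⟩ := hF.1 pe (List.mem_append_right _ (List.mem_singleton_self _))
    have hlt : ∀ q ∈ F, q.1 < pe.1 := by
      intro q hq
      exact (List.pairwise_append.mp hF.2).2.2 q hq pe (List.mem_singleton_self _)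
    obtain ⟨ihm, ihn⟩ := ih hgood'
    have hnd : ¬ pe.1 ∣ pvProdPW F :=
      prime_not_dvd_prodPW pe.1 hppe h2pe F
        (fun q hq => ⟨(hgood'.1 q hq).1, (hgood'.1 q hq).2.2, hlt q hq⟩)
    have hP1 : 1 ≤ pvProdPW F := prodPW_pos F (fun q hq => (hgood'.1 q hq).1)
    have hprodapp : pvProdPW (F ++ [pe]) = pvProdPW F * pe.1 ^ pe.2.toNat := by
      simp [pvProdPW]
    rw [List.foldl_concat]
    have hmemstep : ∀ x, x ∈ pvStep (F.foldl pvStep [1]) pe ↔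
        ∃ d ∈ F.foldl pvStep [1], ∃ k : ℕ, k ≤ pe.2.toNat ∧ x = d * pe.1 ^ k := by
      intro x
      simp only [pvStep, List.mem_flatMap, List.mem_map]
      constructor
      · rintro ⟨d, hd, q, ⟨j, hj, rfl⟩, rfl⟩
        have hj' := PySem.List.mem_pyRange_one.mp hj
        exact ⟨d, hd, j.toNat, by omega, rfl⟩
      · rintro ⟨d, hd, k, hk, rfl⟩
        refine ⟨d, hd, pe.1 ^ k,
          ⟨(k : Int), PySem.List.mem_pyRange_one.mpr ⟨by omega, by omega⟩, by simp⟩, rfl⟩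
    constructor
    · intro x
      rw [hprodapp, hmemstep x]
      constructor
      · rintro ⟨d, hd, k, hk, rfl⟩
        obtain ⟨hd1, hdP⟩ := (ihm d).mp hd
        have hpk1 : (1:Int) ≤ pe.1 ^ k := one_le_pow₀ (by omega)
        exact ⟨by nlinarith, mul_dvd_mul hdP (pow_dvd_pow pe.1 hk)⟩
      · rintro ⟨h1x, hdvd⟩
        have hxa : x.natAbs ∣ (pvProdPW F * pe.1 ^ pe.2.toNat).natAbs :=
          Int.natAbs_dvd_natAbs.mpr hdvd
        rw [Int.natAbs_mul, Int.natAbs_pow] at hxa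
        obtain ⟨a, b, haP, hbp, hab⟩ := Nat.dvd_mul.mp hxa
        have hpn : pe.1.natAbs.Prime := Int.prime_iff_natAbs_prime.mp hppe
        obtain ⟨k, hk, rfl⟩ := (Nat.dvd_prime_pow hpn).mp hbp
        have hxpos : x.natAbs ≠ 0 := by omega
        have ha0 : a ≠ 0 := by
          intro h0
          rw [h0, zero_mul] at hab
          exact hxpos hab.symm
        refine ⟨(a : Int), ?_, k, hk, ?_⟩
        · rw [ihm]
          refine ⟨by omega, ?_⟩
          have h5 := Int.natCast_dvd_natCast.mpr haP
          rwa [Int.natAbs_of_nonneg (by omega)] at h5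
        · have h6 : ((a * pe.1.natAbs ^ k : ℕ) : Int) = x := by
            rw [hab]
            exact Int.natAbs_of_nonneg (by omega)
          push_cast at h6
          rw [abs_of_nonneg (by omega : (0:Int) ≤ pe.1)] at h6
          exact h6.symm
    · simp only [pvStep]
      rw [List.nodup_flatMap]
      constructor
      · intro d hdL
        have hd1 : 1 ≤ d := ((ihm d).mp hdL).1
        refine List.Nodup.map (fun q1 q2 hq => mul_left_cancel₀ (by omega) hq) ?_
        refine List.Nodup.map_on ?_ ?_
        · intro j1 hj1 j2 hj2 hpow
          have hj1' := PySem.List.mem_pyRange_one.mp hj1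
          have hj2' := PySem.List.mem_pyRange_one.mp hj2
          have := pow_eq_pow_nat pe.1 h2pe j1.toNat j2.toNat hpow
          omega
        · exact (PySem.List.pairwise_lt_pyRange_one 0 (pe.2 + 1)).imp (fun h => ne_of_lt h)
      · refine List.Pairwise.imp_of_mem ?_ ihn
        intro d1 d2 h1m h2m hne
        intro z hz1 hz2
        obtain ⟨q1, hq1, hzq1⟩ := List.mem_map.mp hz1
        obtain ⟨q2, hq2, hzq2⟩ := List.mem_map.mp hz2
        obtain ⟨k1, hk1, rfl⟩ := (mem_pw pe.1 pe.2 q1 (by omega)).mp hq1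
        obtain ⟨k2, hk2, rfl⟩ := (mem_pw pe.1 pe.2 q2 (by omega)).mp hq2
        have heq : d1 * pe.1 ^ k1 = d2 * pe.1 ^ k2 := by rw [hzq1, hzq2]
        exact hne (pow_mul_cancel pe.1 (pvProdPW F) d1 d2 k1 k2 h2pe hnd
          ((ihm d1).mp h1m).2 ((ihm d2).mp h2m).2 heq).1

theorem rawB_eq_rawA_sorted (n : Int) (hn : 0 < n) :
    PySem.List.sorted (pvRawA n) (fun x => x) false
      = PySem.List.sorted (pvRawB n) (fun x => x) false := by
  obtain ⟨hgood, hprod⟩ := pvFactors_spec n (by omega)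
  obtain ⟨hmemB, hnodB⟩ := fold_divs (pvFactors n) hgood
  have hSLnod : (pvSmall n ++ pvLarge n).Nodup :=
    (pairwise_SL n hn).imp (fun h => ne_of_lt h)
  have hpermB : (pvRawB n).Perm (pvSmall n ++ pvLarge n) := by
    refine (List.perm_ext_iff_of_nodup (by exact hnodB) hSLnod).mpr ?_
    intro a
    rw [mem_SL n hn a, show (pvRawB n) = (pvFactors n).foldl pvStep [1] from rfl, hmemB a, hprod]
  exact PySem.List.sorted_eq_sorted_of_perm _ _ _ (fun a b h => h)
    ((raw_perm n hn).symm.trans hpermB.symm)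

-- ---- pair phase: A's enumerate/slice loop equals B's suffix loop, on any list ----

theorem fold_inner (a : Int) (L : List Int) (acc : List (Int × Int)) :
    L.foldl (fun pairs b => if Int.gcd a b == 1 then pairs ++ [(a, b)] else pairs) acc
      = acc ++ (L.filter (fun b => Int.gcd a b == 1)).map (fun b => (a, b)) :=
  PySem.List.foldl_append_if _ _ L acc

theorem A_pairs_flat (D : List Int) :
    (PySem.List.enumerate D 0).foldl
      (fun pairs p =>
        (PySem.List.slice D (some p.1) none).foldl
          (fun pairs b => if Int.gcd p.2 b == 1 then pairs ++ [(p.2, b)] else pairs)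
          pairs) []
    = (PySem.List.enumerate D 0).flatMap
        (fun p => ((PySem.List.slice D (some p.1) none).filter
          (fun b => Int.gcd p.2 b == 1)).map (fun b => (p.2, b))) := by
  have houter : ∀ (xs : List (Int × Int)) (acc : List (Int × Int)),
      xs.foldl
        (fun pairs p =>
          (PySem.List.slice D (some p.1) none).foldl
            (fun pairs b => if Int.gcd p.2 b == 1 then pairs ++ [(p.2, b)] else pairs)
            pairs) acc
        = acc ++ xs.flatMap (fun p =>
            ((PySem.List.slice D (some p.1) none).filter
              (fun b => Int.gcd p.2 b == 1)).map (fun b => (p.2, b))) := by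
    intro xs
    induction xs with
    | nil => simp
    | cons x t ih =>
      intro acc
      rw [List.foldl_cons, ih, fold_inner, List.flatMap_cons, List.append_assoc]
  rw [houter, List.nil_append]

theorem pvPairLoop_acc (D : List Int) (acc : List (Int × Int)) :
    pvPairLoop D acc = acc ++ pvPairLoop D [] := by
  induction D generalizing acc with
  | nil => simp [pvPairLoop]
  | cons a rest ih =>
    rw [pvPairLoop, pvPairLoop, ih, List.nil_append,
      ih (((a :: rest).filter (fun b => Int.gcd a b == 1)).map (fun b => (a, b))),
      List.append_assoc]

theorem enum_slice_eq_pairLoop (D pre : List Int) :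
    (PySem.List.enumerate D (pre.length : Int)).flatMap
      (fun p => ((PySem.List.slice (pre ++ D) (some p.1) none).filter
        (fun b => Int.gcd p.2 b == 1)).map (fun b => (p.2, b)))
    = pvPairLoop D [] := by
  induction D generalizing pre with
  | nil => rfl
  | cons a rest ih =>
    rw [PySem.List.enumerate_cons, List.flatMap_cons]
    have h1 : PySem.List.slice (pre ++ a :: rest) (some (pre.length : Int)) none = a :: rest := by
      rw [PySem.List.slice_from_natCast]
      exact List.drop_left
    rw [h1]
    have htail :
        (PySem.List.enumerate rest ((pre.length : Int) + 1)).flatMap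
          (fun p => ((PySem.List.slice (pre ++ a :: rest) (some p.1) none).filter
            (fun b => Int.gcd p.2 b == 1)).map (fun b => (p.2, b)))
        = pvPairLoop rest [] := by
      have hlen : (pre.length : Int) + 1 = (((pre ++ [a]).length : Nat) : Int) := by
        simp
      have hD : pre ++ a :: rest = (pre ++ [a]) ++ rest := by simp
      rw [hlen, hD]
      exact ih (pre ++ [a])
    rw [htail]
    show ((a :: rest).filter (fun b => Int.gcd a b == 1)).map (fun b => (a, b))
        ++ ([] ++ pvPairLoop rest []) = pvPairLoop (a :: rest) []
    rw [List.nil_append, pvPairLoop, List.nil_append,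
      pvPairLoop_acc rest (((a :: rest).filter (fun b => Int.gcd a b == 1)).map (fun b => (a, b)))]

theorem pairs_eq (D : List Int) :
    (PySem.List.enumerate D 0).foldl
      (fun pairs p =>
        (PySem.List.slice D (some p.1) none).foldl
          (fun pairs b => if Int.gcd p.2 b == 1 then pairs ++ [(p.2, b)] else pairs)
          pairs) []
    = pvPairLoop D [] := by
  rw [A_pairs_flat]
  have h := enum_slice_eq_pairLoop D []
  simpa using h

-- ===== VERDICT (by name: the statement is the Claim_ definition above) =====
theorem coprime_pairs_spec : Claim_equal_coprime_pairs := by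
  intro n _
  show coprime_pairs n = coprime_pairs_alt n
  by_cases hn : n ≤ 0
  · show (PySem.List.enumerate (get_divisors n) 0).foldl _ [] = _
    rw [show get_divisors n = [] from by unfold get_divisors; rw [if_pos hn]]
    show ([] : List (Int × Int)) = coprime_pairs_alt n
    unfold coprime_pairs_alt
    rw [if_pos hn]
  · have hn' : 0 < n := by omega
    show (PySem.List.enumerate (get_divisors n) 0).foldl _ [] = _
    rw [pairs_eq (get_divisors n), get_divisors_eq n hn', rawB_eq_rawA_sorted n hn']
    show pvPairLoop (PySem.List.sorted (pvRawB n) (fun x => x) false) [] = coprime_pairs_alt n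
    unfold coprime_pairs_alt
    rw [if_neg hn]
    rfl
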